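-- pv_equiv track=rewrite | github.com/baptistesoulard/Tranportation_Zone_Map | Get_Cities.py | altnames
-- ===== SOURCE A (Python) =====
-- def altnames(names, lang):
--     "Given a dict of names, extract preferred names for a given language"
--     aname = ''
--     for entry in names:
--         if 'isPreferredName' in entry.keys() and entry['lang'] == lang:
--             aname = entry.get('name')
--         else:
--             pass
--     return aname
-- ===== SOURCE B (Python) =====
-- def altnames(names, lang):
--     "Given a dict of names, extract preferred names for a given language"
--     for entry in reversed(list(names)):
--         if 'isPreferredName' in entry.keys() and entry['lang'] == lang:
--             return entry.get('name')
--     return ''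
-- ===== Notes on version B (the rewrite author's own statement) =====
-- stated objective: alternative
-- what changed: Replaces the forward accumulator loop (which overwrites aname on every match and keeps the last one) with a reverse traversal that returns on the first match from the end, maintaining no accumulator and exiting early.
-- outside the precondition, e.g. on altnames([{'isPreferredName': '1'}], 'en'): A raises KeyError, B raises KeyError; on altnames([{'isPreferredName': '1', 'lang': 'en'}], 'en'): A returns None, B returns None
import Mathlib
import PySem

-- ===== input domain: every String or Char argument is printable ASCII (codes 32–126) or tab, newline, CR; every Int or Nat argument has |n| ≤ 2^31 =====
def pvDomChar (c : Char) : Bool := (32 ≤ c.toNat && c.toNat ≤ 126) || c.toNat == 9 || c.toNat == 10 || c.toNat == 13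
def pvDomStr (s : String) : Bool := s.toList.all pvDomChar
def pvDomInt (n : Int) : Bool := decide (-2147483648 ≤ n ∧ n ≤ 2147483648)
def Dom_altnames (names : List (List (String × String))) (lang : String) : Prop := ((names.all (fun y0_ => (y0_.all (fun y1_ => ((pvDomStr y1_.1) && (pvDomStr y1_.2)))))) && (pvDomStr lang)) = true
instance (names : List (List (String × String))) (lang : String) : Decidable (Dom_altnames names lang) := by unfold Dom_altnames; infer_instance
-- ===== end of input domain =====

-- B replaces A's forward accumulator loop (last match wins by overwriting) with a
-- reverse traversal returning the first match from the end — same value, no accumulator, early exit.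


-- shared between both ports and Pre_: the Python condition
-- `'isPreferredName' in entry.keys() and entry['lang'] == lang`
-- (entry['lang'] via get?/getD: the missing-key case, where Python raises KeyError, is excluded by Pre_)
def pvMatch (lang : String) (e : List (String × String)) : Bool :=
  (PySem.Dict.ofList e).contains "isPreferredName" &&
    (((PySem.Dict.ofList e).get? "lang").getD "" == lang)

-- `entry.get('name')`; the None case (key absent) is excluded by Pre_
def pvName (e : List (String × String)) : String :=
  ((PySem.Dict.ofList e).get? "name").getD ""

-- ===== PORT A =====
def altnames (names : List (List (String × String))) (lang : String) : String :=
  names.foldl (fun aname entry => if pvMatch lang entry then pvName entry else aname) ""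

-- ===== PORT B =====
def altnamesLoop (lang : String) : List (List (String × String)) → String
  | [] => ""
  | entry :: rest => if pvMatch lang entry then pvName entry else altnamesLoop lang rest

def altnames_alt (names : List (List (String × String))) (lang : String) : String :=
  altnamesLoop lang names.reverse

-- ===== PRECONDITION & SPEC =====
-- Pre_ excludes inputs where Python A raises KeyError (an entry has the 'isPreferredName' key
-- but no 'lang' key) and inputs where A returns None instead of a string (the last matching
-- entry has no 'name' key); both Pythons behave identically there (raise / return None).
def Pre_altnames (names : List (List (String × String))) (lang : String) : Prop :=
  ((names.all fun e => !(PySem.Dict.ofList e).contains "isPreferredName"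
                        || (PySem.Dict.ofList e).contains "lang")
    && ((names.reverse.find? (pvMatch lang)).all
          fun e => ((PySem.Dict.ofList e).get? "name").isSome)) = true
instance (names : List (List (String × String))) (lang : String) : Decidable (Pre_altnames names lang) := by unfold Pre_altnames; infer_instance

def pvWitness_altnames : (List (List (String × String))) × String :=
  ([[("isPreferredName", "1"), ("lang", "en"), ("name", "London")],
    [("lang", "fr"), ("name", "Londres")]], "en")

def Spec_altnames (names : List (List (String × String))) (lang : String) (out : String) : Prop := out = altnames_alt names lang
instance (names : List (List (String × String))) (lang : String) (out : String) : Decidable (Spec_altnames names lang out) := by unfold Spec_altnames; infer_instance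

-- ===== CLAIM (what is proved, stated in full; the proofs are below) =====
def Claim_equal_altnames : Prop := ∀ (names : List (List (String × String))) (lang : String), Dom_altnames names lang → Pre_altnames names lang → Spec_altnames names lang (altnames names lang)

-- ===== LEMMAS AND PROOFS =====

-- B's loop generalized with a default for the no-match case
def pvLoopD (lang : String) (acc : String) : List (List (String × String)) → String
  | [] => acc
  | e :: rest => if pvMatch lang e then pvName e else pvLoopD lang acc rest

theorem pvLoopD_append_singleton (lang acc : String) (e : List (String × String)) :
    ∀ xs, pvLoopD lang acc (xs ++ [e])
      = pvLoopD lang (if pvMatch lang e then pvName e else acc) xs := by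
  intro xs
  induction xs with
  | nil => simp [pvLoopD]
  | cons x xs ih => simp [pvLoopD, ih]

theorem foldl_eq_pvLoopD (lang : String) :
    ∀ (l : List (List (String × String))) (acc : String),
      l.foldl (fun aname entry => if pvMatch lang entry then pvName entry else aname) acc
        = pvLoopD lang acc l.reverse := by
  intro l
  induction l with
  | nil => intro acc; rfl
  | cons e l ih =>
      intro acc
      simp only [List.foldl_cons, List.reverse_cons, ih, pvLoopD_append_singleton]

theorem pvLoopD_empty_eq_loop (lang : String) :
    ∀ l, pvLoopD lang "" l = altnamesLoop lang l := by
  intro l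
  induction l with
  | nil => rfl
  | cons e l ih => simp [pvLoopD, altnamesLoop, ih]

-- ===== VERDICT (by name: the statement is the Claim_ definition above) =====
theorem altnames_spec : Claim_equal_altnames := by
  intro names lang _ _
  show altnames names lang = altnames_alt names lang
  rw [altnames, altnames_alt, foldl_eq_pvLoopD, pvLoopD_empty_eq_loop]
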